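-- pv_equiv track=rewrite | github.com/ashandg4/LeetCode | wc-404/100340.py | f
-- ===== SOURCE A (Python) =====
-- def f(a, b):
--     ans = 0
--     for i in range(100):
--         if i % 2 == 0:
--             if a >= (i+1):
--                 ans += 1
--                 a -= (i+1)
--             else:
--                 return ans
--         else:
--             if b >= (i+1):
--                 ans += 1
--                 b -= (i+1)
--             else:
--                 return ans
-- ===== SOURCE B (Python) =====
-- import math
--
-- def f(a, b):
--     # a funds the odd-sized steps 1,3,5,... (k of them cost k*k); b funds the
--     # even-sized steps 2,4,6,... (m of them cost m*(m+1)).  The answer is the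
--     # index of the first unaffordable step when steps alternate a,b,a,b,...
--     ka = math.isqrt(max(a, 0))
--     mb = (math.isqrt(max(4 * b + 1, 1)) - 1) // 2
--     return min(2 * ka, 2 * mb + 1)
-- ===== Notes on version B (the rewrite author's own statement) =====
-- stated objective: simpler
-- what changed: Replaces the 100-iteration simulation loop by a closed form (ka = isqrt(a) affordable a-steps, mb = (isqrt(4b+1)-1)//2 affordable b-steps, answer min(2*ka, 2*mb+1)); Pre_ excludes the inputs where A's loop completes all 100 steps and falls through returning None, a non-int value.
-- outside the precondition, e.g. on f(2500, 2550): A returns None, B returns 100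
import Mathlib
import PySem

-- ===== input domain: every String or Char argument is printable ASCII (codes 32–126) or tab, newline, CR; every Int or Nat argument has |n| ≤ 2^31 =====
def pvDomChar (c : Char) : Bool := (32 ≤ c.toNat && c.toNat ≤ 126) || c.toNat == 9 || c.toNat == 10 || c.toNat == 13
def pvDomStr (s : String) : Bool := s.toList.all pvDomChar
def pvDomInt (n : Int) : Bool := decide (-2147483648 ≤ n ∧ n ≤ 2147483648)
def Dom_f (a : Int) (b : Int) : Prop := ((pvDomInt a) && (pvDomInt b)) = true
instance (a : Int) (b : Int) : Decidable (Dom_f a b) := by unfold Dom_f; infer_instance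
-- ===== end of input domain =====

-- B replaces A's 100-step simulation by a closed form via integer square roots (objective: simpler).

-- ===== PORT A =====
-- the for-loop with early return, as fuel recursion over the remaining iterations;
-- fuel exhausted = Python falls through and returns None (outside Pre_f; 0 is a placeholder)
def fLoop : Nat → Nat → Int → Int → Int → Int
  | 0, _, _, _, _ => 0
  | fuel + 1, i, a, b, ans =>
      if i % 2 = 0 then
        if a ≥ (i : Int) + 1 then fLoop fuel (i + 1) (a - ((i : Int) + 1)) b (ans + 1)
        else ans
      else
        if b ≥ (i : Int) + 1 then fLoop fuel (i + 1) a (b - ((i : Int) + 1)) (ans + 1)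
        else ans

def f (a : Int) (b : Int) : Int := fLoop 100 0 a b 0

-- ===== PORT B =====
def f_alt (a : Int) (b : Int) : Int :=
  let ka : Int := (Nat.sqrt (max a 0).toNat : Int)
  let mb : Int := PySem.Int.floordiv ((Nat.sqrt (max (4 * b + 1) 1).toNat : Int) - 1) 2
  min (2 * ka) (2 * mb + 1)

-- ===== PRECONDITION & SPEC =====
-- Pre_f excludes exactly the inputs on which A's loop finishes all 100 steps and the
-- Python function falls through returning None, a value outside the declared int result type.
def Pre_f (a : Int) (b : Int) : Prop := a < 2500 ∨ b < 2550
instance (a : Int) (b : Int) : Decidable (Pre_f a b) := by unfold Pre_f; infer_instance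
def pvWitness_f : Int × Int := (12, 7)
def Spec_f (a : Int) (b : Int) (out : Int) : Prop := out = f_alt a b
instance (a : Int) (b : Int) (out : Int) : Decidable (Spec_f a b out) := by unfold Spec_f; infer_instance

-- ===== CLAIM (what is proved, stated in full; the proofs are below) =====
def Claim_equal_f : Prop := ∀ (a : Int) (b : Int), Dom_f a b → Pre_f a b → Spec_f a b (f a b)

-- ===== LEMMAS AND PROOFS =====

-- number of consecutive affordable a-steps from pair index j (step sizes 2j+1, 2j+3, …, ≤ 50 pairs)
def K : Nat → Int → Nat
  | j, a => if h : j < 50 ∧ a ≥ 2 * (j : Int) + 1 then K (j + 1) (a - (2 * (j : Int) + 1)) + 1 else 0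
  termination_by j _ => 50 - j

-- number of consecutive affordable b-steps from pair index j (step sizes 2j+2, 2j+4, …)
def M : Nat → Int → Nat
  | j, b => if h : j < 50 ∧ b ≥ 2 * (j : Int) + 2 then M (j + 1) (b - (2 * (j : Int) + 2)) + 1 else 0
  termination_by j _ => 50 - j

theorem K_50 (a : Int) : K 50 a = 0 := by
  rw [K, dif_neg]; omega

theorem M_50 (b : Int) : M 50 b = 0 := by
  rw [M, dif_neg]; omega

theorem K_le (j : Nat) (a : Int) : K j a ≤ 50 - j := by
  fun_induction K j a with
  | case1 j a hc ih => omega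
  | case2 j a hc => omega

theorem K_cost (j : Nat) (a : Int) : 0 < K j a → (K j a : Int) * (2 * j + K j a) ≤ a := by
  fun_induction K j a with
  | case1 j a hc ih =>
    intro _
    by_cases h0 : 0 < K (j + 1) (a - (2 * (j : Int) + 1))
    · have := ih h0; push_cast; push_cast at this; nlinarith
    · have hz : K (j + 1) (a - (2 * (j : Int) + 1)) = 0 := by omega
      rw [hz]; push_cast; nlinarith [hc.2]
  | case2 j a hc => omega

theorem K_fail (j : Nat) (a : Int) : K j a < 50 - j →
    a < ((K j a : Int) + 1) * (2 * j + K j a + 1) := by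
  fun_induction K j a with
  | case1 j a hc ih =>
    intro h
    have := ih (by omega)
    push_cast; push_cast at this; nlinarith
  | case2 j a hc =>
    intro h
    push_cast; omega

theorem M_le (j : Nat) (b : Int) : M j b ≤ 50 - j := by
  fun_induction M j b with
  | case1 j b hc ih => omega
  | case2 j b hc => omega

theorem M_cost (j : Nat) (b : Int) : 0 < M j b → (M j b : Int) * (2 * j + M j b + 1) ≤ b := by
  fun_induction M j b with
  | case1 j b hc ih =>
    intro _
    by_cases h0 : 0 < M (j + 1) (b - (2 * (j : Int) + 2))
    · have := ih h0; push_cast; push_cast at this; nlinarith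
    · have hz : M (j + 1) (b - (2 * (j : Int) + 2)) = 0 := by omega
      rw [hz]; push_cast; nlinarith [hc.2]
  | case2 j b hc => omega

theorem M_fail (j : Nat) (b : Int) : M j b < 50 - j →
    b < ((M j b : Int) + 1) * (2 * j + M j b + 2) := by
  fun_induction M j b with
  | case1 j b hc ih =>
    intro h
    have := ih (by omega)
    push_cast; push_cast at this; nlinarith
  | case2 j b hc =>
    intro h
    push_cast; omega

theorem fLoop_eq (n : Nat) : ∀ (j : Nat) (a b ans : Int), j + n = 50 →
    ¬ (K j a = n ∧ M j b = n) →
    fLoop (2 * n) (2 * j) a b ans = ans + min (2 * (K j a : Int)) (2 * (M j b : Int) + 1) := by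
  induction n with
  | zero =>
    intro j a b ans hj hne
    exfalso
    apply hne
    have hj' : j = 50 := by omega
    subst hj'
    exact ⟨K_50 a, M_50 b⟩
  | succ n ih =>
    intro j a b ans hj hne
    have h2 : 2 * (n + 1) = (2 * n + 1) + 1 := by ring
    rw [h2]
    show (if (2 * j) % 2 = 0 then _ else _) = _
    rw [if_pos (by omega)]
    by_cases ha : a ≥ (2 * j : Nat) + 1
    · rw [if_pos ha]
      have hKa : K j a = K (j + 1) (a - (2 * (j : Int) + 1)) + 1 := by
        rw [K]; rw [dif_pos ⟨by omega, by push_cast at ha ⊢; omega⟩]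
      show (if (2 * j + 1) % 2 = 0 then _ else _) = _
      rw [if_neg (by omega)]
      by_cases hb : b ≥ (2 * j + 1 : Nat) + 1
      · rw [if_pos hb]
        have hMb : M j b = M (j + 1) (b - (2 * (j : Int) + 2)) + 1 := by
          rw [M]; rw [dif_pos ⟨by omega, by push_cast at hb ⊢; omega⟩]
        have hstep : ((2 * j + 1 : Nat) + 1 : Nat) = 2 * (j + 1) := by omega
        have harg1 : a - ((2 * j : Nat) + 1 : Int) = a - (2 * (j : Int) + 1) := by push_cast; ring
        have harg2 : b - ((2 * j + 1 : Nat) + 1 : Int) = b - (2 * (j : Int) + 2) := by push_cast; ring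
        rw [hstep, harg1, harg2]
        rw [ih (j + 1) _ _ (ans + 1 + 1) (by omega) (by omega)]
        rw [hKa, hMb]; push_cast; omega
      · rw [if_neg hb]
        have hMb : M j b = 0 := by
          rw [M]; rw [dif_neg (by push_cast at hb ⊢; omega)]
        rw [hKa, hMb]; push_cast; omega
    · rw [if_neg ha]
      have hKa : K j a = 0 := by
        rw [K]; rw [dif_neg (by push_cast at ha ⊢; omega)]
      rw [hKa]
      have : (0 : Int) ≤ 2 * (M j b : Int) + 1 := by positivity
      push_cast; omega

-- bridge: K 0 / M 0 versus the closed forms of f_alt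
theorem K0_sqrt (a : Int) (ha : 0 ≤ a) (h : K 0 a < 50) : Nat.sqrt a.toNat = K 0 a := by
  have hlo : (K 0 a : Int) * (K 0 a) ≤ a := by
    by_cases h0 : 0 < K 0 a
    · have := K_cost 0 a h0; push_cast at this ⊢; nlinarith
    · have : K 0 a = 0 := by omega
      rw [this]; simpa using ha
  have hhi : a < ((K 0 a : Int) + 1) * ((K 0 a : Int) + 1) := by
    have := K_fail 0 a (by omega); push_cast at this ⊢; nlinarith
  have hcast : (a.toNat : Int) = a := Int.toNat_of_nonneg ha
  have hn1 : a.toNat < (K 0 a + 1) * (K 0 a + 1) := by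
    have : ((a.toNat : Int)) < ((K 0 a : Int) + 1) * ((K 0 a : Int) + 1) := by rw [hcast]; exact hhi
    push_cast at this; exact_mod_cast this
  have hn2 : K 0 a * K 0 a ≤ a.toNat := by
    have : ((K 0 a : Int)) * (K 0 a : Int) ≤ (a.toNat : Int) := by rw [hcast]; exact hlo
    exact_mod_cast this
  have h1 : Nat.sqrt a.toNat < K 0 a + 1 := Nat.sqrt_lt.mpr hn1
  have h2 : K 0 a ≤ Nat.sqrt a.toNat := Nat.le_sqrt.mpr hn2
  omega

theorem K0_full (a : Int) (h : K 0 a = 50) : 2500 ≤ a := by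
  have := K_cost 0 a (by omega)
  rw [h] at this; push_cast at this; linarith

theorem M0_m (b : Int) (hb : 0 ≤ b) (h : M 0 b < 50) :
    PySem.Int.floordiv ((Nat.sqrt (4 * b + 1).toNat : Int) - 1) 2 = M 0 b := by
  have hlo : (M 0 b : Int) * ((M 0 b : Int) + 1) ≤ b := by
    by_cases h0 : 0 < M 0 b
    · have := M_cost 0 b h0; push_cast at this ⊢; nlinarith
    · have : M 0 b = 0 := by omega
      rw [this]; simpa using hb
  have hhi : b < ((M 0 b : Int) + 1) * ((M 0 b : Int) + 2) := by
    have := M_fail 0 b (by omega); push_cast at this ⊢; nlinarith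
  set m := M 0 b with hm
  have hs1 : (2 * m + 1) ≤ Nat.sqrt (4 * b + 1).toNat := by
    apply Nat.le_sqrt.mpr
    have : ((2 * m + 1 : Nat) : Int) * ((2 * m + 1 : Nat) : Int) ≤ 4 * b + 1 := by
      push_cast; nlinarith
    omega
  have hs2 : Nat.sqrt (4 * b + 1).toNat < 2 * m + 3 := by
    rw [Nat.sqrt_lt]
    have : (4 * b + 1) < ((2 * m + 3 : Nat) : Int) * ((2 * m + 3 : Nat) : Int) := by
      push_cast; nlinarith
    omega
  rw [PySem.Int.floordiv_eq_iff_of_pos (by omega)]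
  omega

theorem M0_full (b : Int) (h : M 0 b = 50) : 2550 ≤ b := by
  have := M_cost 0 b (by omega)
  rw [h] at this; push_cast at this; linarith

theorem fdiv2_big (b : Int) (hb : 2550 ≤ b) :
    50 ≤ PySem.Int.floordiv ((Nat.sqrt (4 * b + 1).toNat : Int) - 1) 2 := by
  have hs : 101 ≤ Nat.sqrt (4 * b + 1).toNat := by
    apply Nat.le_sqrt.mpr
    omega
  rw [PySem.Int.le_floordiv_iff_mul_le (by omega)]
  omega

theorem K0_neg (a : Int) (ha : a < 0) : K 0 a = 0 := by
  rw [K]; rw [dif_neg (by push_cast; omega)]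

theorem M0_neg (b : Int) (hb : b < 0) : M 0 b = 0 := by
  rw [M]; rw [dif_neg (by push_cast; omega)]

-- ===== VERDICT (by name: the statement is the Claim_ definition above) =====
theorem f_spec : Claim_equal_f := by
  intro a b _ hpre
  unfold Spec_f f f_alt
  have hKM : ¬ (K 0 a = 50 ∧ M 0 b = 50) := by
    rintro ⟨hK, hM⟩
    rcases hpre with h | h
    · exact absurd (K0_full a hK) (by omega)
    · exact absurd (M0_full b hM) (by omega)
  have hloop : fLoop 100 0 a b 0 = min (2 * (K 0 a : Int)) (2 * (M 0 b : Int) + 1) := by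
    have := fLoop_eq 50 0 a b 0 (by omega) (by simpa using hKM)
    simpa using this
  rw [hloop]
  have hKle := K_le 0 a
  have hMle := M_le 0 b
  set ka : Int := (Nat.sqrt (max a 0).toNat : Int) with hka
  set mb : Int := PySem.Int.floordiv ((Nat.sqrt (max (4 * b + 1) 1).toNat : Int) - 1) 2 with hmb
  show min (2 * (K 0 a : Int)) (2 * (M 0 b : Int) + 1) = min (2 * ka) (2 * mb + 1)
  have hK' : (K 0 a < 50 ∧ ka = (K 0 a : Int)) ∨ (K 0 a = 50 ∧ 50 ≤ ka) := by
    by_cases ha : 0 ≤ a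
    · have hmax : max a 0 = a := by omega
      rcases lt_or_eq_of_le (by omega : K 0 a ≤ 50) with h | h
      · left
        refine ⟨h, ?_⟩
        rw [hka, hmax, K0_sqrt a ha h]
      · right
        refine ⟨h, ?_⟩
        rw [hka, hmax]
        have h2500 := K0_full a h
        have : 50 ≤ Nat.sqrt a.toNat := Nat.le_sqrt.mpr (by omega)
        omega
    · left
      have hmax : max a 0 = 0 := by omega
      rw [K0_neg a (by omega), hka, hmax]
      refine ⟨by omega, ?_⟩
      norm_num
  have hM' : (M 0 b < 50 ∧ mb = (M 0 b : Int)) ∨ (M 0 b = 50 ∧ 50 ≤ mb) := by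
    by_cases hb : 0 ≤ b
    · have hmax : max (4 * b + 1) 1 = 4 * b + 1 := by omega
      rcases lt_or_eq_of_le (by omega : M 0 b ≤ 50) with h | h
      · left
        refine ⟨h, ?_⟩
        rw [hmb, hmax, M0_m b hb h]
      · right
        refine ⟨h, ?_⟩
        rw [hmb, hmax]
        exact fdiv2_big b (M0_full b h)
    · left
      have hmax : max (4 * b + 1) 1 = 1 := by omega
      rw [M0_neg b (by omega), hmb, hmax]
      refine ⟨by omega, ?_⟩
      norm_num [PySem.Int.floordiv]
  rcases hK' with ⟨hK1, hK2⟩ | ⟨hK1, hK2⟩ <;> rcases hM' with ⟨hM1, hM2⟩ | ⟨hM1, hM2⟩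
  · omega
  · omega
  · omega
  · exact absurd ⟨hK1, hM1⟩ hKM
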